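-- pv_equiv track=rewrite | github.com/paul-emilemorgades/Dolphin | computePortefolio.py | getTheNBest
-- ===== SOURCE A (Python) =====
-- def getTheNBest(means,n):
--     tab = [0 for i in range(len(means))]
--     for i in range(len(means)):
--         tab[i] = (i, means[i])
--     res = sorted(tab, key = lambda item: item[1], reverse=True)
--     res = res[:n]
--     res = [i[0] for i in res]
--     otherAsset = [i for i in range(len(means))]
--     for i in res:
--         otherAsset.remove(i)
--     return  res, otherAsset
-- ===== SOURCE B (Python) =====
-- def getTheNBest(means, n):
--     # One argsort of the indices; slicing it partitions into chosen / unchosen,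
--     # and the complement is rebuilt by sorting the leftover slice ascending.
--     order = sorted(range(len(means)), key=lambda i: means[i], reverse=True)
--     return order[:n], sorted(order[n:])
-- ===== Notes on version B (the rewrite author's own statement) =====
-- stated objective: faster
-- what changed: B argsorts the indices once and partitions that order by slicing (re-sorting the leftover slice for the complement), replacing A's tuple table plus a per-chosen-element list.remove scan over range(len(means)).
import Mathlib
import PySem

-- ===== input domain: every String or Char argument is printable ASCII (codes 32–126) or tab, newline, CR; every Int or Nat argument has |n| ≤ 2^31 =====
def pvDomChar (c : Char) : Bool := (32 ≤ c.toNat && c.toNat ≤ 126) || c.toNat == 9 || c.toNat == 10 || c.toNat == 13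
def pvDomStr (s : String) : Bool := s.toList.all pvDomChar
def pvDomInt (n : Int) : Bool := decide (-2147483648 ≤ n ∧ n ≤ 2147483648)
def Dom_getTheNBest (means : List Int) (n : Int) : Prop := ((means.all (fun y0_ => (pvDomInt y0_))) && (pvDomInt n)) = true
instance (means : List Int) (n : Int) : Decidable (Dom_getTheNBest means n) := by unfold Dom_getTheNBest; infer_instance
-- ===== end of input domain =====

-- B replaces A's tuple table + per-element list.remove complement scan by one argsort of the
-- indices partitioned by slicing, re-sorting the leftover slice for the complement (objective: faster — drops the O(n*m) remove scans).

-- ===== PORT A =====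
-- tab = [0]*len(means) is fully overwritten with pairs (i, means[i]) before use; Lean is typed,
-- so the (never-observed) initial cells are the dummy pair (0, 0).
-- otherAsset.remove(i): remove? is always `some` here (res holds distinct indices of range(len(means)));
-- the .getD acc branch is unreachable (Python never raises).
def getTheNBest (means : List Int) (n : Int) : List Int × List Int :=
  let tab : List (Int × Int) :=
    (PySem.List.pyRange 0 (PySem.List.len means) 1).foldl
      (fun acc i => acc.set i.toNat (i, PySem.List.pyGetD means i 0))
      ((PySem.List.pyRange 0 (PySem.List.len means) 1).map (fun _ => ((0 : Int), (0 : Int))))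
  let res1 := PySem.List.sorted tab (fun item => item.2) true
  let res2 := PySem.List.slice res1 none (some n)
  let res : List Int := res2.map (fun i => i.1)
  let otherAsset0 : List Int := PySem.List.pyRange 0 (PySem.List.len means) 1
  let otherAsset := res.foldl (fun acc i => (PySem.List.remove? acc i).getD acc) otherAsset0
  (res, otherAsset)

-- ===== PORT B =====
def getTheNBest_alt (means : List Int) (n : Int) : List Int × List Int :=
  let order := PySem.List.sorted (PySem.List.pyRange 0 (PySem.List.len means) 1)
                 (fun i => PySem.List.pyGetD means i 0) true
  (PySem.List.slice order none (some n),
   PySem.List.sorted (PySem.List.slice order (some n) none) (fun x => x) false)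

-- ===== PRECONDITION & SPEC =====
def Spec_getTheNBest (means : List Int) (n : Int) (out : List Int × List Int) : Prop := out = getTheNBest_alt means n
instance (means : List Int) (n : Int) (out : List Int × List Int) : Decidable (Spec_getTheNBest means n out) := by unfold Spec_getTheNBest; infer_instance

-- ===== CLAIM (what is proved, stated in full; the proofs are below) =====
def Claim_equal_getTheNBest : Prop := ∀ (means : List Int) (n : Int), Dom_getTheNBest means n → Spec_getTheNBest means n (getTheNBest means n)

-- ===== LEMMAS AND PROOFS =====

-- insertBy commutes with map when the predicate factors through the mapped values.
theorem pv_insertBy_map {α β : Type} (f : α → β) (p : β → β → Bool) (x : α) (ys : List α) :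
    PySem.List.insertBy p (f x) (ys.map f)
      = (PySem.List.insertBy (fun a b => p (f a) (f b)) x ys).map f := by
  induction ys with
  | nil => simp [PySem.List.insertBy]
  | cons y ys ih =>
      simp only [List.map_cons, PySem.List.insertBy]
      by_cases h : p (f x) (f y) = true <;> simp [h, ih]

-- a stable key-sort of a mapped list is the map of the sort under the composed key
theorem pv_sorted_map {α β : Type} (f : α → β) (k : β → Int) (xs : List α) (rev : Bool) :
    PySem.List.sorted (xs.map f) k rev
      = (PySem.List.sorted xs (fun x => k (f x)) rev).map f := by
  have hgen : ∀ (p : β → β → Bool) (acc : List α),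
      (xs.map f).foldl (fun a x => PySem.List.insertBy p x a) (acc.map f)
        = (xs.foldl (fun a x => PySem.List.insertBy (fun a b => p (f a) (f b)) x a) acc).map f := by
    induction xs with
    | nil => intro p acc; simp
    | cons x xs ih =>
        intro p acc
        simp only [List.map_cons, List.foldl_cons]
        rw [pv_insertBy_map f p x acc]
        exact ih p _
  cases rev <;> simp only [PySem.List.sorted] <;> exact hgen _ []

theorem pv_slice_map {α β : Type} (f : α → β) (xs : List α) (a? b? : Option Int) :
    PySem.List.slice (xs.map f) a? b? = (PySem.List.slice xs a? b?).map f := by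
  cases a? <;> cases b? <;> simp [PySem.List.slice]

theorem pv_slice_take (xs : List Int) (i : Int) :
    PySem.List.slice xs none (some i) = xs.take (PySem.List.clampIdx xs.length i) := by
  simp [PySem.List.slice]


-- A's tab-filling loop writes (i, means[i]) into every cell: it is the map over the range.
theorem pv_foldl_set (f : Int → Int × Int) (m : Nat) :
    ∀ (k a : Nat) (init : List (Int × Int)), init.length = m → a + k = m →
    (PySem.List.pyRange (a : Int) (m : Int) 1).foldl (fun acc i => acc.set i.toNat (f i)) init
      = init.take a ++ (PySem.List.pyRange (a : Int) (m : Int) 1).map f := by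
  intro k
  induction k with
  | zero =>
      intro a init hlen ham
      have ha : a = m := by omega
      subst ha
      rw [PySem.List.pyRange_one_eq_nil (le_refl _)]
      simp [List.take_of_length_le (Nat.le_of_eq hlen)]
  | succ k ih =>
      intro a init hlen ham
      have hab : (a : Int) < (m : Int) := by omega
      rw [PySem.List.pyRange_one_cons hab]
      simp only [List.foldl_cons, List.map_cons]
      have hcast : ((a : Int) + 1) = ((a + 1 : Nat) : Int) := by push_cast; ring
      have hset : (init.set ((a : Int)).toNat (f a)).length = m := by simp [hlen]
      rw [hcast, ih (a + 1) _ hset (by omega), ← hcast]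
      have ha : a < init.length := by omega
      have htake : (init.set ((a : Int)).toNat (f a)).take (a + 1) = init.take a ++ [f a] := by
        rw [Int.toNat_natCast, List.set_eq_take_append_cons_drop, if_pos ha, List.take_append]
        simp [List.length_take, Nat.min_eq_left (le_of_lt ha)]
      rw [htake, List.append_assoc]
      simp

-- remove-or-keep is List.erase
theorem pv_step_erase (acc : List Int) (i : Int) :
    ((PySem.List.remove? acc i).getD acc) = acc.erase i := by
  by_cases h : i ∈ acc
  · rw [PySem.List.remove?_eq_some_erase _ _ h]; rfl
  · rw [(PySem.List.remove?_eq_none_iff acc i).mpr h, List.erase_of_not_mem h]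
    rfl

theorem pv_foldl_erase (ys : List Int) :
    ∀ (xs : List Int), xs.Nodup →
    ys.foldl (fun acc i => acc.erase i) xs = xs.filter (fun x => decide (x ∉ ys)) := by
  induction ys with
  | nil => intro xs _; simp
  | cons y ys ih =>
      intro xs hnd
      simp only [List.foldl_cons]
      rw [ih (xs.erase y) (hnd.erase y), List.Nodup.erase_eq_filter hnd, List.filter_filter]
      apply List.filter_congr
      intro x _
      simp only [List.mem_cons, not_or]
      rw [Bool.and_comm]
      by_cases hxy : x = y
      · simp [hxy]
      · simp [hxy]

theorem getTheNBest_eq (means : List Int) (n : Int) :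
    getTheNBest means n = getTheNBest_alt means n := by
  unfold getTheNBest getTheNBest_alt
  dsimp only
  have hlenmeans : PySem.List.len means = (means.length : Int) := by simp [PySem.List.len_eq]
  set f : Int → Int × Int := fun i => (i, PySem.List.pyGetD means i 0) with hf
  set R : List Int := PySem.List.pyRange 0 (PySem.List.len means) 1 with hR
  have hlenR : R.length = means.length := by
    rw [hR, hlenmeans]; simp [PySem.List.length_pyRange_one]
  have htab : R.foldl (fun acc i => acc.set i.toNat (i, PySem.List.pyGetD means i 0))
        (R.map fun _ => ((0 : Int), (0 : Int))) = R.map f := by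
    have h0 := pv_foldl_set f means.length means.length 0
        (R.map fun _ => ((0 : Int), (0 : Int))) (by simp [hlenR]) (by omega)
    rw [hR, hlenmeans]
    simpa [hf, hlenR] using h0
  rw [htab, pv_sorted_map f (fun p => p.2) R true]
  set order : List Int := PySem.List.sorted R (fun i => PySem.List.pyGetD means i 0) true with horddef
  rw [pv_slice_map f order none (some n)]
  set c : Nat := PySem.List.clampIdx order.length n with hc
  set res : List Int := PySem.List.slice order none (some n) with hres
  set rest : List Int := PySem.List.slice order (some n) none with hrest
  have hres' : res = order.take c := by rw [hres, pv_slice_take, hc]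
  have hrest' : rest = order.drop c := by rw [hrest, PySem.List.slice_some_none, hc]
  have hfst : (res.map f).map (fun p => p.1) = res := by
    rw [List.map_map]
    have hcomp : ((fun p : Int × Int => p.1) ∘ f) = id := by funext i; simp [hf]
    rw [hcomp, List.map_id]
  rw [hfst]
  refine Prod.ext rfl ?_
  -- second component
  have hnodupR : R.Nodup := by rw [hR]; exact PySem.List.nodup_pyRange_one 0 _
  have horder : order.Perm R := PySem.List.sorted_perm R _ true
  have hnodupO : order.Nodup := (horder.nodup_iff).mpr hnodupR
  have hdisj : ∀ x ∈ rest, x ∉ res := by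
    intro x hx hx'
    rw [hres'] at hx'
    rw [hrest'] at hx
    exact (List.disjoint_take_drop hnodupO (le_refl c)) hx' hx
  have hsplit : res ++ rest = order := by rw [hres', hrest']; exact List.take_append_drop c order
  simp only [pv_step_erase]
  rw [pv_foldl_erase res R hnodupR]
  set p : Int → Bool := fun x => decide (x ∉ res) with hp
  have hfilt : (res ++ rest).filter p = rest := by
    rw [List.filter_append]
    have h1 : res.filter p = [] := by
      rw [List.filter_eq_nil_iff]; intro x hx; simp [hp, hx]
    have h2 : rest.filter p = rest := by
      rw [List.filter_eq_self]; intro x hx; simp [hp, hdisj x hx]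
    rw [h1, h2, List.nil_append]
  have hperm : (R.filter p).Perm rest := by
    have : (R.filter p).Perm ((res ++ rest).filter p) := by
      refine List.Perm.filter p ?_
      rw [hsplit]; exact horder.symm
    rwa [hfilt] at this
  have hpair : (R.filter p).Pairwise (· ≤ ·) := by
    refine List.Pairwise.imp le_of_lt ?_
    refine List.Pairwise.filter p ?_
    rw [hR]; exact PySem.List.pairwise_lt_pyRange_one 0 _
  exact (PySem.List.sorted_id_eq_of_perm_of_pairwise _ _ hperm hpair).symm

-- ===== VERDICT (by name: the statement is the Claim_ definition above) =====
theorem getTheNBest_spec : Claim_equal_getTheNBest := by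
  intro means n _
  unfold Spec_getTheNBest
  exact getTheNBest_eq means n
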